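-- pv_equiv track=rewrite | github.com/hybug/RL_Lab | envs/env_instances/lord/sl_helper/sl_kick_helper.py | judge_card_inhand
-- ===== SOURCE A (Python) =====
-- def judge_card_inhand(kick_cards: str, hand_rank_list: list,
--                       major_rank_list: list,
--                       total_major_rank_list: list) -> bool:
--     kickcards_rank_list = kick_cards.split(' ')
--     hand_rank_list_copy = hand_rank_list.copy()
--     for card_rank in kickcards_rank_list:
--         if card_rank in hand_rank_list_copy and card_rank not in major_rank_list and card_rank not in total_major_rank_list:
--             hand_rank_list_copy.remove(card_rank)
--         else:
--             return False
--
--     return True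
-- ===== SOURCE B (Python) =====
-- def judge_card_inhand(kick_cards: str, hand_rank_list: list,
--                       major_rank_list: list,
--                       total_major_rank_list: list) -> bool:
--     kicks = kick_cards.split(' ')
--     banned = set(major_rank_list) | set(total_major_rank_list)
--     if any(k in banned for k in kicks):
--         return False
--     need = {}
--     for k in kicks:
--         need[k] = need.get(k, 0) + 1
--     have = {}
--     for h in hand_rank_list:
--         have[h] = have.get(h, 0) + 1
--     return all(have.get(k, 0) >= c for k, c in need.items())
-- ===== Notes on version B (the rewrite author's own statement) =====
-- stated objective: alternative
-- what changed: Replaced the interleaved scan-and-remove loop (repeated membership tests and list.remove over a mutating hand copy) by a separate banned-set pass plus a single multiset-subset comparison of two frequency tables built in one pass each.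
import Mathlib
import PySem

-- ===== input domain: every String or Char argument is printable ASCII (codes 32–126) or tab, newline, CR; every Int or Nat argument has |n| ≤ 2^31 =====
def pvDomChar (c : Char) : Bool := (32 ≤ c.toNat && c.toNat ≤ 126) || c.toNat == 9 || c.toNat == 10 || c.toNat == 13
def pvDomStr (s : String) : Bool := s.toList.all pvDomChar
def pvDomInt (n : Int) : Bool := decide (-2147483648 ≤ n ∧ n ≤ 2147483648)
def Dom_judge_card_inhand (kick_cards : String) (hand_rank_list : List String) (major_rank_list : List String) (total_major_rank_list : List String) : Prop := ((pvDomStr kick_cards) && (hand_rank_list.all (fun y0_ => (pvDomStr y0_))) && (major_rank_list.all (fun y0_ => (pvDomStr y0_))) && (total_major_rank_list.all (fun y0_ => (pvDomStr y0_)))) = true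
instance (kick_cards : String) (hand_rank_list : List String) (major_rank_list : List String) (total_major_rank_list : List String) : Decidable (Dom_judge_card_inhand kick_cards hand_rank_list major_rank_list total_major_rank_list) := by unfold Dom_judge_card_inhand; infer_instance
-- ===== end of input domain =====

-- B replaces A's interleaved scan-and-remove loop by one banned-set pass plus a
-- frequency-table (multiset-subset) comparison; objective: alternative algorithm.

-- ===== PORT A =====
-- the 'for card_rank in kickcards_rank_list' loop, carrying the mutating hand copy
def judgeLoopA (ks : List String) (hand : List String) (maj : List String) (tot : List String) : Bool :=
  match ks with
  | [] => true
  | k :: rest =>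
    if hand.contains k && !(maj.contains k) && !(tot.contains k) then
      judgeLoopA rest ((PySem.List.remove? hand k).getD hand) maj tot
    else false

def judge_card_inhand (kick_cards : String) (hand_rank_list : List String) (major_rank_list : List String) (total_major_rank_list : List String) : Bool :=
  judgeLoopA ((PySem.Str.split? kick_cards " ").getD []) hand_rank_list major_rank_list total_major_rank_list

-- ===== PORT B =====
-- the 'd[x] = d.get(x, 0) + 1' counting loop of Source B
def pyCountDict (xs : List String) : PySem.Dict String Int :=
  xs.foldl (fun d k => d.insert k (d.getD k 0 + 1)) PySem.Dict.empty

def judge_card_inhand_alt (kick_cards : String) (hand_rank_list : List String) (major_rank_list : List String) (total_major_rank_list : List String) : Bool :=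
  let kicks := (PySem.Str.split? kick_cards " ").getD []
  let banned := PySem.Set.union (PySem.Set.ofList major_rank_list) total_major_rank_list
  if kicks.any (fun k => PySem.Set.contains banned k) then false
  else
    (pyCountDict kicks).items.all
      (fun p => decide ((pyCountDict hand_rank_list).getD p.1 0 ≥ p.2))

-- ===== PRECONDITION & SPEC =====
def Spec_judge_card_inhand (kick_cards : String) (hand_rank_list : List String) (major_rank_list : List String) (total_major_rank_list : List String) (out : Bool) : Prop := out = judge_card_inhand_alt kick_cards hand_rank_list major_rank_list total_major_rank_list
instance (kick_cards : String) (hand_rank_list : List String) (major_rank_list : List String) (total_major_rank_list : List String) (out : Bool) : Decidable (Spec_judge_card_inhand kick_cards hand_rank_list major_rank_list total_major_rank_list out) := by unfold Spec_judge_card_inhand; infer_instance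

-- ===== CLAIM (what is proved, stated in full; the proofs are below) =====
def Claim_equal_judge_card_inhand : Prop := ∀ (kick_cards : String) (hand_rank_list : List String) (major_rank_list : List String) (total_major_rank_list : List String), Dom_judge_card_inhand kick_cards hand_rank_list major_rank_list total_major_rank_list → Spec_judge_card_inhand kick_cards hand_rank_list major_rank_list total_major_rank_list (judge_card_inhand kick_cards hand_rank_list major_rank_list total_major_rank_list)

-- ===== LEMMAS AND PROOFS =====

-- removing one copy of k from the hand: the remaining demand of rest matches the
-- demand of k :: rest against the full hand
lemma count_erase_iff (k : String) (rest hand : List String) (hk : k ∈ hand) :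
    (∀ r ∈ rest, List.count r rest ≤ List.count r (hand.erase k)) ↔
    (∀ r ∈ k :: rest, List.count r (k :: rest) ≤ List.count r hand) := by
  have hcp : 1 ≤ hand.count k := List.one_le_count_iff.mpr hk
  constructor
  · intro h r hr
    have hmem := List.mem_cons.mp hr
    by_cases hrk : r = k
    · subst hrk
      by_cases hkr : r ∈ rest
      · have h1 := h r hkr
        have hce : List.count r (hand.erase r) = List.count r hand - 1 := List.count_erase_self
        rw [List.count_cons_self]
        omega
      · rw [List.count_cons_self, List.count_eq_zero_of_not_mem hkr]
        omega
    · have hr' : r ∈ rest := by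
        rcases hmem with h1 | h1
        · exact absurd h1 hrk
        · exact h1
      have h1 := h r hr'
      have hce : List.count r (hand.erase k) = List.count r hand := List.count_erase_of_ne hrk
      have hcc : List.count r (k :: rest) = List.count r rest := by
        simp [List.count_cons, Ne.symm hrk]
      omega
  · intro h r hr
    by_cases hrk : r = k
    · subst hrk
      have h1 := h r List.mem_cons_self
      have hce : List.count r (hand.erase r) = List.count r hand - 1 := List.count_erase_self
      rw [List.count_cons_self] at h1
      omega
    · have h1 := h r (List.mem_cons_of_mem k hr)
      have hce : List.count r (hand.erase k) = List.count r hand := List.count_erase_of_ne hrk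
      have hcc : List.count r (k :: rest) = List.count r rest := by
        simp [List.count_cons, Ne.symm hrk]
      omega

-- characterisation of A's loop: it succeeds iff no kick is a major rank and the
-- kicks form a sub-multiset of the hand
lemma loopA_eq (ks : List String) (hand maj tot : List String) :
    judgeLoopA ks hand maj tot =
      (ks.all (fun k => !(maj.contains k) && !(tot.contains k)) &&
       decide (∀ k ∈ ks, ks.count k ≤ hand.count k)) := by
  induction ks generalizing hand with
  | nil => simp [judgeLoopA]
  | cons k rest ih =>
    by_cases hk : k ∈ hand
    · rw [judgeLoopA, PySem.List.remove?_eq_some_erase hand k hk]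
      by_cases hm : k ∈ maj ∨ k ∈ tot
      · rcases hm with h | h <;> simp [h]
      · push_neg at hm
        simp only [List.contains_eq_mem, Option.getD_some, hk, hm.1, hm.2,
          decide_true, decide_false, Bool.not_false, Bool.true_and, if_pos,
          List.all_cons, Bool.and_self]
        rw [ih]
        simp only [count_erase_iff k rest hand hk]
        simp [List.contains_eq_mem]
    · rw [judgeLoopA]
      have hns : ¬ (∀ r ∈ k :: rest, List.count r (k :: rest) ≤ List.count r hand) := by
        intro h
        have h2 := h k List.mem_cons_self
        simp only [List.count_cons_self, List.count_eq_zero_of_not_mem hk] at h2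
        omega
      have hc : hand.contains k = false := by simpa using hk
      rw [hc, Bool.false_and, Bool.false_and, if_neg (by simp)]
      symm
      rw [decide_eq_false hns, Bool.and_false]

lemma pyCountDict_getD (xs : List String) (v : String) :
    (pyCountDict xs).getD v 0 = (xs.count v : Int) := by
  rw [pyCountDict, PySem.Dict.foldl_insert_getD_add_one_eq_counter,
    PySem.Dict.getD_counter]

lemma pyCountDict_items (xs : List String) :
    (pyCountDict xs).items = (PySem.Set.ofList xs).map (fun k => (k, (xs.count k : Int))) := by
  rw [pyCountDict, PySem.Dict.foldl_insert_getD_add_one_eq_counter,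
    PySem.Dict.items_counter]

-- characterisation of B: same banned test and same multiset comparison
lemma alt_eq (kick_cards : String) (hand maj tot : List String) :
    judge_card_inhand_alt kick_cards hand maj tot =
      (((PySem.Str.split? kick_cards " ").getD []).all
          (fun k => !(maj.contains k) && !(tot.contains k)) &&
       decide (∀ k ∈ (PySem.Str.split? kick_cards " ").getD [],
          ((PySem.Str.split? kick_cards " ").getD []).count k ≤ hand.count k)) := by
  unfold judge_card_inhand_alt
  set kicks := (PySem.Str.split? kick_cards " ").getD [] with hkicks
  have hb : ∀ k : String,
      PySem.Set.contains (PySem.Set.union (PySem.Set.ofList maj) tot) k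
        = (maj.contains k || tot.contains k) := by
    intro k
    rw [Bool.eq_iff_iff]
    simp [PySem.Set.mem_union, PySem.Set.mem_ofList]
  simp only [hb]
  have hnot : (!(kicks.any fun k => maj.contains k || tot.contains k))
      = kicks.all (fun k => !(maj.contains k) && !(tot.contains k)) := by
    induction kicks with
    | nil => rfl
    | cons a l ihl => rw [List.any_cons, Bool.not_or, Bool.not_or, ihl, List.all_cons]
  by_cases hany : (kicks.any fun k => maj.contains k || tot.contains k) = true
  · rw [if_pos hany]
    rw [hany] at hnot
    rw [← hnot]
    simp
  · rw [if_neg hany]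
    have hany' : (kicks.any fun k => maj.contains k || tot.contains k) = false :=
      Bool.eq_false_iff.mpr hany
    rw [hany'] at hnot
    rw [← hnot, Bool.not_false, Bool.true_and]
    rw [Bool.eq_iff_iff]
    simp only [List.all_eq_true, pyCountDict_items, List.mem_map, decide_eq_true_eq,
      PySem.Set.mem_ofList, pyCountDict_getD]
    constructor
    · intro h k hkk
      have := h (k, (kicks.count k : Int)) ⟨k, hkk, rfl⟩
      simp only at this
      omega
    · intro h p hp
      rcases hp with ⟨k, hkk, rfl⟩
      have := h k hkk
      simp only
      omega

-- ===== VERDICT (by name: the statement is the Claim_ definition above) =====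
theorem judge_card_inhand_spec : Claim_equal_judge_card_inhand := by
  intro kc hand maj tot _
  unfold Spec_judge_card_inhand judge_card_inhand
  rw [loopA_eq, alt_eq]
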